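-- pv_equiv track=rewrite | github.com/nharrison917/radio-programming-analytics | analytics/era_continuity.py | _modal_era
-- ===== SOURCE A (Python) =====
-- def _modal_era(years, band):
--     """Find Y in years that maximises count of tracks with |year - Y| <= band."""
--     candidates = [y for y in years if y is not None]
--     if not candidates:
--         return None
--     best_y, best_count = None, 0
--     for candidate in candidates:
--         count = sum(1 for y in candidates if abs(y - candidate) <= band)
--         if count > best_count:
--             best_count, best_y = count, candidate
--     return best_y
-- ===== SOURCE B (Python) =====
-- def _bisect_left(a, x):
--     lo, hi = 0, len(a)
--     while lo < hi:
--         mid = (lo + hi) // 2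
--         if a[mid] < x:
--             lo = mid + 1
--         else:
--             hi = mid
--     return lo
--
--
-- def _bisect_right(a, x):
--     lo, hi = 0, len(a)
--     while lo < hi:
--         mid = (lo + hi) // 2
--         if x < a[mid]:
--             hi = mid
--         else:
--             lo = mid + 1
--     return lo
--
--
-- def _modal_era(years, band):
--     """Find Y in years that maximises count of tracks with |year - Y| <= band."""
--     candidates = [y for y in years if y is not None]
--     if not candidates:
--         return None
--     s = sorted(candidates)
--     counts = [_bisect_right(s, c + band) - _bisect_left(s, c - band) for c in candidates]
--     best = max(counts)
--     if best <= 0: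
--         return None
--     return candidates[counts.index(best)]
-- ===== Notes on version B (the rewrite author's own statement) =====
-- stated objective: faster
-- what changed: B sorts the candidates once and counts each candidate's window with two binary searches (bisect_right minus bisect_left) instead of A's inner linear scan per candidate.
import Mathlib
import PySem

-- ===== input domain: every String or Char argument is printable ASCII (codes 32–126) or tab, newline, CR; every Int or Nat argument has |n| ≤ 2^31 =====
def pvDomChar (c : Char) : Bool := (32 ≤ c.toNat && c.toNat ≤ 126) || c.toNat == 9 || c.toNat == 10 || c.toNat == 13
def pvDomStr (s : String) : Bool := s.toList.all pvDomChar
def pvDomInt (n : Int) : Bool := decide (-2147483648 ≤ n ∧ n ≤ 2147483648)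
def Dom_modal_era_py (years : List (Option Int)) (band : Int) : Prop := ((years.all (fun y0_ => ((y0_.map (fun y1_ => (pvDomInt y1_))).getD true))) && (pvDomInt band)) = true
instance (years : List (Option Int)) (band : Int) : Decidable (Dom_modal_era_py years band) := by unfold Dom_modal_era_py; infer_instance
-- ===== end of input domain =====

-- B replaces A's quadratic best-count scan by one sort, a binary-search window count per candidate,
-- and a max/index selection (objective: faster).

-- ===== PORT A =====
-- literal port of A: filter out None, quadratic inner count per candidate, strict-improvement update
def modal_era_py (years : List (Option Int)) (band : Int) : Option Int :=
  let candidates := years.filterMap id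
  if candidates = [] then none
  else
    (candidates.foldl (fun (st : Option Int × Int) candidate =>
      let count : Int := candidates.foldl
        (fun acc y => if |y - candidate| ≤ band then acc + 1 else acc) 0
      if count > st.2 then (some candidate, count) else st) (none, 0)).1

-- ===== PORT B =====
-- Source B's hand-written _bisect_left/_bisect_right are the textbook bisect loops, identical to the
-- PySem primitives PySem.List.bisectLeft/bisectRight, which port them exactly; Python's max() and
-- list.index() raise on an empty/missing argument, so their PySem ports return Option — the `none`
-- match arms below are those exceptional (here unreachable) cases, not extra algorithm branches.
def modal_era_py_alt (years : List (Option Int)) (band : Int) : Option Int :=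
  let candidates := years.filterMap id
  if candidates = [] then none
  else
    let s := PySem.List.sorted candidates (fun y => y) false
    let counts := candidates.map (fun c =>
      (PySem.List.bisectRight s (c + band) : Int) - (PySem.List.bisectLeft s (c - band) : Int))
    match PySem.List.max? counts (fun x => x) with
    | none => none
    | some best =>
      if best ≤ 0 then none
      else
        match PySem.List.index? counts best with
        | none => none
        | some i => PySem.List.pyGet? candidates (i : Int)

-- ===== PRECONDITION & SPEC =====
def Spec_modal_era_py (years : List (Option Int)) (band : Int) (out : Option Int) : Prop := out = modal_era_py_alt years band
instance (years : List (Option Int)) (band : Int) (out : Option Int) : Decidable (Spec_modal_era_py years band out) := by unfold Spec_modal_era_py; infer_instance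

-- ===== CLAIM (what is proved, stated in full; the proofs are below) =====
def Claim_equal_modal_era_py : Prop := ∀ (years : List (Option Int)) (band : Int), Dom_modal_era_py years band → Spec_modal_era_py years band (modal_era_py years band)

-- ===== LEMMAS AND PROOFS =====

-- On a sorted list, bisectLeft counts the elements < x.
theorem bisectLeft_eq_countP (s : List Int) (x : Int)
    (hs : s.Pairwise (fun a b => a ≤ b)) :
    PySem.List.bisectLeft s x = s.countP (fun y => decide (y < x)) := by
  obtain ⟨hle, hlt, hge⟩ := PySem.List.bisectLeft_spec s x hs
  set b := PySem.List.bisectLeft s x with hb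
  have htake : (s.take b).countP (fun y => decide (y < x)) = b := by
    have h1 : ∀ a ∈ s.take b, (fun y => decide (y < x)) a = true := by
      intro a ha
      obtain ⟨i, hi, rfl⟩ := List.mem_iff_getElem.mp ha
      have hi' : i < b := by
        have := hi
        simp [List.length_take] at this
        omega
      have hilen : i < s.length := lt_of_lt_of_le hi' hle
      have := hlt i hilen hi'
      simp only [List.getElem_take]
      simpa using this
    rw [List.countP_eq_length.mpr h1, List.length_take]
    omega
  have hdrop : (s.drop b).countP (fun y => decide (y < x)) = 0 := by
    apply List.countP_eq_zero.mpr
    intro a ha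
    obtain ⟨i, hi, rfl⟩ := List.mem_iff_getElem.mp ha
    have hilen : b + i < s.length := by
      have := hi; simp [List.length_drop] at this; omega
    have := hge (b + i) hilen (by omega)
    simp only [List.getElem_drop]
    simpa using not_lt.mpr this
  conv_rhs => rw [← List.take_append_drop b s]
  rw [List.countP_append, htake, hdrop]
  omega

-- On a sorted list, bisectRight counts the elements ≤ x.
theorem bisectRight_eq_countP (s : List Int) (x : Int)
    (hs : s.Pairwise (fun a b => a ≤ b)) :
    PySem.List.bisectRight s x = s.countP (fun y => decide (y ≤ x)) := by
  obtain ⟨hle, hlt, hge⟩ := PySem.List.bisectRight_spec s x hs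
  set b := PySem.List.bisectRight s x with hb
  have htake : (s.take b).countP (fun y => decide (y ≤ x)) = b := by
    have h1 : ∀ a ∈ s.take b, (fun y => decide (y ≤ x)) a = true := by
      intro a ha
      obtain ⟨i, hi, rfl⟩ := List.mem_iff_getElem.mp ha
      have hi' : i < b := by
        have := hi; simp [List.length_take] at this; omega
      have hilen : i < s.length := lt_of_lt_of_le hi' hle
      have := hlt i hilen hi'
      simp only [List.getElem_take]
      simpa using this
    rw [List.countP_eq_length.mpr h1, List.length_take]
    omega
  have hdrop : (s.drop b).countP (fun y => decide (y ≤ x)) = 0 := by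
    apply List.countP_eq_zero.mpr
    intro a ha
    obtain ⟨i, hi, rfl⟩ := List.mem_iff_getElem.mp ha
    have hilen : b + i < s.length := by
      have := hi; simp [List.length_drop] at this; omega
    have := hge (b + i) hilen (by omega)
    simp only [List.getElem_drop]
    simpa using not_le.mpr this
  conv_rhs => rw [← List.take_append_drop b s]
  rw [List.countP_append, htake, hdrop]
  omega

-- #{≤ hi} − #{< lo} = #{lo ≤ · ≤ hi} − #{hi < · < lo} (the last term is 0 unless hi < lo).
theorem countP_window (l : List Int) (lo hi : Int) :
    (l.countP (fun y => decide (y ≤ hi)) : Int) - (l.countP (fun y => decide (y < lo)) : Int)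
      = (l.countP (fun y => decide (lo ≤ y ∧ y ≤ hi)) : Int)
      - (l.countP (fun y => decide (hi < y ∧ y < lo)) : Int) := by
  induction l with
  | nil => simp
  | cons a t ih =>
    simp only [List.countP_cons]
    push_cast
    split_ifs <;> simp only [decide_eq_true_eq] at * <;> omega

-- a running max of a projection is bounded by any common upper bound
theorem foldl_max_le (f : Int → Int) (A : Int) :
    ∀ (l : List Int) (init : Int), init ≤ A → (∀ c ∈ l, f c ≤ A) →
      l.foldl (fun a c => max a (f c)) init ≤ A := by
  intro l
  induction l with
  | nil => intro init h _; simpa using h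
  | cons c t ih =>
    intro init h1 h2
    simp only [List.foldl_cons]
    exact ih _ (max_le h1 (h2 c List.mem_cons_self)) (fun d hd => h2 d (List.mem_cons_of_mem c hd))

-- A's strict-improvement fold returns the initial carry if nothing beats the bound,
-- else the FIRST element attaining the running maximum.
theorem fold_sel (h : Int → Int) :
    ∀ (l : List Int) (o : Option Int) (b : Int),
      (l.foldl (fun st c => if h c > st.2 then (some c, h c) else st) ((o, b) : Option Int × Int)).1
        = if l.foldl (fun a c => max a (h c)) b = b then o
          else l.find? (fun c => h c == l.foldl (fun a c => max a (h c)) b) := by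
  intro l
  induction l with
  | nil => intro o b; simp
  | cons c t ih =>
    intro o b
    simp only [List.foldl_cons]
    have hM := PySem.List.le_foldl_max_int t h (max b (h c))
    by_cases hc : h c > b
    · have hbase : max b (h c) = h c := by omega
      rw [if_pos hc, ih (some c) (h c)]
      rw [hbase] at hM ⊢
      have hMb : ¬ t.foldl (fun a c => max a (h c)) (h c) = b := by omega
      rw [if_neg hMb]
      by_cases hMc : t.foldl (fun a c => max a (h c)) (h c) = h c
      · rw [if_pos hMc, List.find?_cons]
        have : (h c == t.foldl (fun a c => max a (h c)) (h c)) = true := by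
          simpa using hMc.symm
        rw [this]
      · rw [if_neg hMc, List.find?_cons]
        have : (h c == t.foldl (fun a c => max a (h c)) (h c)) = false := by
          simpa using fun hx => hMc hx.symm
        rw [this]
    · have hbase : max b (h c) = b := by omega
      rw [if_neg hc, ih o b, hbase]
      rw [hbase] at hM
      by_cases hMb : t.foldl (fun a c => max a (h c)) b = b
      · rw [if_pos hMb, if_pos hMb]
      · rw [if_neg hMb, if_neg hMb, List.find?_cons]
        have : (h c == t.foldl (fun a c => max a (h c)) b) = false := by
          have := hM.1
          simpa using by omega
        rw [this]

-- list.index into the mapped counts followed by indexing is find? on the original list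
theorem index_map_get (h : Int → Int) (v : Int) :
    ∀ (l : List Int),
      (match PySem.List.index? (l.map h) v with
       | none => (none : Option Int)
       | some i => PySem.List.pyGet? l (i : Int))
        = l.find? (fun c => h c == v) := by
  intro l
  induction l with
  | nil => simp [PySem.List.index?]
  | cons c t ih =>
    by_cases hc : h c = v
    · have h0 : PySem.List.index? (h c :: t.map h) v = some 0 := by
        rw [show h c = v from hc]; exact PySem.List.index?_cons_self _ _
      simp only [List.map_cons, h0, List.find?_cons]
      have : (h c == v) = true := by simpa using hc
      rw [this]
      simpa using PySem.List.pyGet?_natCast (c :: t) 0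
    · have h1 : PySem.List.index? (h c :: t.map h) v = (PySem.List.index? (t.map h) v).map (· + 1) := by
        exact PySem.List.index?_cons_of_ne _ hc
      simp only [List.map_cons, h1, List.find?_cons]
      have : (h c == v) = false := by simpa using hc
      rw [this, ← ih]
      cases hidx : PySem.List.index? (t.map h) v with
      | none => simp
      | some i =>
        simp only [Option.map_some]
        rw [PySem.List.pyGet?_natCast (c :: t) (i + 1), PySem.List.pyGet?_natCast t i]
        simp

-- find? only looks at the predicate's value on members
theorem find?_congr_mem (p q : Int → Bool) :
    ∀ (l : List Int), (∀ c ∈ l, p c = q c) → l.find? p = l.find? q := by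
  intro l
  induction l with
  | nil => intro _; rfl
  | cons c t ih =>
    intro hpq
    rw [List.find?_cons, List.find?_cons, hpq c List.mem_cons_self,
        ih (fun d hd => hpq d (List.mem_cons_of_mem c hd))]

-- ===== VERDICT (by name: the statement is the Claim_ definition above) =====
theorem modal_era_py_spec : Claim_equal_modal_era_py := by
  intro years band _
  unfold Spec_modal_era_py modal_era_py modal_era_py_alt
  set cand := years.filterMap id with hcand
  by_cases hnil : cand = []
  · simp [hnil]
  · simp only [hnil, if_neg, not_false_iff]
    set s := PySem.List.sorted cand (fun y => y) false with hsdef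
    have hperm : s.Perm cand := PySem.List.sorted_perm cand (fun y => y) false
    have hsort : s.Pairwise (fun a b => a ≤ b) := by
      simpa using PySem.List.sorted_pairwise cand (fun y => y)
    set f : Int → Int := fun c => (cand.countP (fun y => decide (c - band ≤ y ∧ y ≤ c + band)) : Int) with hfdef
    set g : Int → Int := fun c => (PySem.List.bisectRight s (c + band) : Int) - (PySem.List.bisectLeft s (c - band) : Int) with hgdef
    set e : Int → Int := fun c => (cand.countP (fun y => decide (c + band < y ∧ y < c - band)) : Int) with hedef
    have hg : ∀ c, g c = f c - e c := by
      intro c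
      have hR := bisectRight_eq_countP s (c + band) hsort
      have hL := bisectLeft_eq_countP s (c - band) hsort
      have hw := countP_window s (c - band) (c + band)
      have h1 := hperm.countP_eq (fun y => decide (c - band ≤ y ∧ y ≤ c + band))
      have h2 := hperm.countP_eq (fun y => decide (c + band < y ∧ y < c - band))
      simp only [hgdef, hfdef, hedef, hR, hL]
      push_cast at hw h1 h2 ⊢
      omega
    have hfnn : ∀ c, 0 ≤ f c := fun c => Int.natCast_nonneg _
    have henn : ∀ c, 0 ≤ e c := fun c => Int.natCast_nonneg _
    have hgle : ∀ c, g c ≤ f c := by intro c; have := henn c; rw [hg c]; omega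
    have hne : ∀ c, g c ≠ f c → f c = 0 := by
      intro c hc
      have he0 : e c ≠ 0 := by intro h; apply hc; rw [hg c, h]; ring
      have hpos : 0 < cand.countP (fun y => decide (c + band < y ∧ y < c - band)) := by
        rcases Nat.eq_zero_or_pos (cand.countP (fun y => decide (c + band < y ∧ y < c - band))) with h | h
        · exact absurd (by simp only [hedef, h, Nat.cast_zero] : e c = 0) he0
        · exact h
      obtain ⟨y, _, hy⟩ := List.countP_pos_iff.mp hpos
      simp only [decide_eq_true_eq] at hy
      have hlt : c + band < c - band := lt_trans hy.1 hy.2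
      have : cand.countP (fun y => decide (c - band ≤ y ∧ y ≤ c + band)) = 0 := by
        apply List.countP_eq_zero.mpr
        intro a _
        simp only [decide_eq_true_eq]
        omega
      simp only [hfdef, this, Nat.cast_zero]
    -- A's inner loop computes f
    have hAcount : ∀ c, cand.foldl (fun acc y => if |y - c| ≤ band then acc + 1 else acc) (0 : Int) = f c := by
      intro c
      rw [show (fun acc y => if |y - c| ≤ band then acc + 1 else acc)
            = (fun (acc : Int) y => if (fun y => decide (c - band ≤ y ∧ y ≤ c + band)) y = true then acc + 1 else acc) from ?_]
      · rw [PySem.List.foldl_count_if]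
        simp [hfdef]
      · funext acc y
        have : (|y - c| ≤ band) ↔ (c - band ≤ y ∧ y ≤ c + band) := by
          rw [abs_le]; omega
        simp [this]
    have hstepA : (fun (st : Option Int × Int) candidate =>
        if (cand.foldl (fun acc y => if |y - candidate| ≤ band then acc + 1 else acc) (0 : Int)) > st.2
        then (some candidate, cand.foldl (fun acc y => if |y - candidate| ≤ band then acc + 1 else acc) (0 : Int))
        else st)
        = (fun (st : Option Int × Int) c => if f c > st.2 then (some c, f c) else st) := by
      funext st c; rw [hAcount c]
    simp only [hstepA]
    rw [fold_sel f cand none 0]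
    -- B side: the max over counts exists
    set counts := cand.map g with hcounts
    have hcne : counts ≠ [] := by
      simpa [hcounts] using hnil
    obtain ⟨best, hbest⟩ : ∃ best, PySem.List.max? counts (fun x => x) = some best := by
      cases hb : PySem.List.max? counts (fun x => x) with
      | none => exact absurd ((PySem.List.max?_eq_none_iff counts (fun x => x)).mp hb) hcne
      | some b => exact ⟨b, rfl⟩
    have hbmem : best ∈ counts := PySem.List.max?_mem hbest
    have hbmax : ∀ y ∈ counts, y ≤ best := by
      intro y hy; simpa using PySem.List.max?_isMax hbest y hy
    obtain ⟨cstar, hcmem, hcval⟩ := List.mem_map.mp (hcounts ▸ hbmem)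
    have hgb : ∀ c ∈ cand, g c ≤ best := fun c hc => hbmax _ (hcounts ▸ List.mem_map_of_mem hc)
    simp only [hbest]
    set M := cand.foldl (fun a c => max a (f c)) 0 with hM
    have hMle := PySem.List.le_foldl_max_int cand f 0
    by_cases hb0 : best ≤ 0
    · -- every f-count is 0, so A never improves on 0 and returns none too
      have hf0 : ∀ c ∈ cand, f c ≤ 0 := by
        intro c hc
        by_cases hfg : g c = f c
        · rw [← hfg]; exact le_trans (hgb c hc) hb0
        · rw [hne c hfg]
      have hM0 : M = 0 := le_antisymm (foldl_max_le f 0 cand 0 le_rfl hf0) hMle.1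
      rw [if_pos hb0, if_pos hM0]
    · -- best > 0 is attained by f as well, and the two first-argmax selections coincide
      have hfg_star : f cstar = best := by
        by_cases hfg : g cstar = f cstar
        · rw [← hfg, hcval]
        · have h0 : f cstar = 0 := hne cstar hfg
          have h1 : g cstar ≤ 0 := by have := hg cstar; have := henn cstar; omega
          rw [hcval] at h1; omega
      have hfle : ∀ c ∈ cand, f c ≤ best := by
        intro c hc
        by_cases hfg : g c = f c
        · rw [← hfg]; exact hgb c hc
        · rw [hne c hfg]; omega
      have hMbest : M = best := by
        apply le_antisymm (foldl_max_le f best cand 0 (by omega) hfle)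
        rw [← hfg_star]; exact hMle.2 cstar hcmem
      have hMne : ¬ M = 0 := by omega
      rw [if_neg hMne, if_neg hb0, hcounts, index_map_get g best cand, hMbest]
      exact find?_congr_mem _ _ cand (fun c hc => by
        by_cases hfg : g c = f c
        · rw [hfg]
        · have hf0 : f c = 0 := hne c hfg
          have hg0 : g c ≤ 0 := by rw [hg c, hf0]; have := henn c; omega
          have e1 : (f c == best) = false := by simp [hf0]; omega
          have e2 : (g c == best) = false := by simp; omega
          rw [e1, e2])
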